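-- pv_equiv track=rewrite | github.com/TavinV/senai-projects | Controle de Vendas Python/CalcularFrete.py | calcular_taxa_do_frete
-- ===== SOURCE A (Python) =====
-- tabela_de_valores_do_frete = {
--     10 : 20,
--     20 : 30,
--     30 : 40,
--     40 : 50,
-- }
--
-- def calcular_taxa_do_frete(distancia: int) ->  int:
--     """
--     Calcula a taxa do frete baseado na ditancia
--
--         Inputs:
--             int distancia : A distancia em KM do cliente, caso seja menor que 0 ou superior a 40, o frete sera cancelado.
--         Outputs:
--             int valor_a_pagar_frete : O valor em R$ a pagar pelo frete.
--     """
--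
--     valor_a_pagar_frete = 0
--
--     distancia_anterior = 10;
--
--     for distancia_maxima, valor_em_reais in tabela_de_valores_do_frete.items():
--         if distancia <= distancia_maxima and distancia >= distancia_anterior:
--             valor_a_pagar_frete = valor_em_reais
--         elif distancia < 10:
--             valor_a_pagar_frete = tabela_de_valores_do_frete[10]
--         distancia_anterior = distancia_maxima
--
--
--     return valor_a_pagar_frete
-- ===== SOURCE B (Python) =====
-- def calcular_taxa_do_frete(distancia: int) -> int:
--     if distancia < 10:
--         return 20
--     elif distancia < 20:
--         return 30
--     elif distancia < 30:
--         return 40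
--     elif distancia <= 40:
--         return 50
--     else:
--         return 0
-- ===== Notes on version B (the rewrite author's own statement) =====
-- stated objective: simpler
-- what changed: Replaced the stateful loop over the module-level fee table (tracking distancia_anterior and overwriting the accumulator) with a direct if/elif threshold chain returning each fee immediately.
import Mathlib
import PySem

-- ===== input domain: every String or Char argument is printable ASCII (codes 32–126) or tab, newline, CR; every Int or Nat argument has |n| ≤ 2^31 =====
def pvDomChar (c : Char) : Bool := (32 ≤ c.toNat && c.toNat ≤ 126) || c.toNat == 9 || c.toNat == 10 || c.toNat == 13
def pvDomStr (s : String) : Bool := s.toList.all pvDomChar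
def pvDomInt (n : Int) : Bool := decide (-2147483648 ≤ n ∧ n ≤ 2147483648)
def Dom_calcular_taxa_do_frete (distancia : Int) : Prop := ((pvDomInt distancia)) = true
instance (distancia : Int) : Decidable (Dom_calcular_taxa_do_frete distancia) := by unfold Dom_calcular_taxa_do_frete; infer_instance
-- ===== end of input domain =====

-- B replaces A's stateful loop over the fee table with a direct if/elif threshold chain (objective: simpler).


-- ===== PORT A =====
-- fee table as association list in insertion order (Python dict of A)
def tabela_de_valores_do_frete : List (Int × Int) := [(10, 20), (20, 30), (30, 40), (40, 50)]

-- literal port of A: fold over the table carrying (valor_a_pagar_frete, distancia_anterior)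
def calcular_taxa_do_frete (distancia : Int) : Int :=
  (tabela_de_valores_do_frete.foldl
    (fun (st : Int × Int) (kv : Int × Int) =>
      let valor := if distancia ≤ kv.1 ∧ distancia ≥ st.2 then kv.2
                   else if distancia < 10 then 20  -- tabela_de_valores_do_frete[10] = 20
                   else st.1
      (valor, kv.1))
    (0, 10)).1

-- ===== PORT B =====
-- B: direct threshold classification, no table, no loop
def calcular_taxa_do_frete_alt (distancia : Int) : Int :=
  if distancia < 10 then 20
  else if distancia < 20 then 30
  else if distancia < 30 then 40
  else if distancia ≤ 40 then 50
  else 0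

-- ===== PRECONDITION & SPEC =====
def Spec_calcular_taxa_do_frete (distancia : Int) (out : Int) : Prop := out = calcular_taxa_do_frete_alt distancia
instance (distancia : Int) (out : Int) : Decidable (Spec_calcular_taxa_do_frete distancia out) := by unfold Spec_calcular_taxa_do_frete; infer_instance

-- ===== CLAIM (what is proved, stated in full; the proofs are below) =====
def Claim_equal_calcular_taxa_do_frete : Prop := ∀ (distancia : Int), Dom_calcular_taxa_do_frete distancia → Spec_calcular_taxa_do_frete distancia (calcular_taxa_do_frete distancia)

-- ===== LEMMAS AND PROOFS =====

-- ===== VERDICT (by name: the statement is the Claim_ definition above) =====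
theorem calcular_taxa_do_frete_spec : Claim_equal_calcular_taxa_do_frete := by
  intro d _
  unfold Spec_calcular_taxa_do_frete calcular_taxa_do_frete calcular_taxa_do_frete_alt
    tabela_de_valores_do_frete
  simp only [List.foldl]
  split_ifs <;> omega
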